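-- pv_equiv track=rewrite | github.com/plamensve/Python_Advanced | EXAM_PREPARATION/Python Advanced Exam - 19 February 2022/pawn_wars.py | chess_position
-- ===== SOURCE A (Python) =====
-- def chess_position(pos_row, pos_col):
--     coordinates = [pos_row, pos_col]
--     for r in range(SIZE):
--         for c in range(SIZE):
--             letter = chr(c + 97)
--             number = 8 - r
--             if [r, c] == coordinates:
--                 return f"{letter}{number}"
--
-- SIZE = 8
-- ===== SOURCE B (Python) =====
-- def chess_position(pos_row, pos_col):
--     if pos_row in range(8) and pos_col in range(8):
--         return f"{chr(int(pos_col) + 97)}{8 - int(pos_row)}"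
-- ===== Notes on version B (the rewrite author's own statement) =====
-- stated objective: simpler
-- what changed: Replaced the 8x8 nested scan-for-equal-coordinates with a direct range check plus a closed-form chr/arithmetic formula.
import Mathlib
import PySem

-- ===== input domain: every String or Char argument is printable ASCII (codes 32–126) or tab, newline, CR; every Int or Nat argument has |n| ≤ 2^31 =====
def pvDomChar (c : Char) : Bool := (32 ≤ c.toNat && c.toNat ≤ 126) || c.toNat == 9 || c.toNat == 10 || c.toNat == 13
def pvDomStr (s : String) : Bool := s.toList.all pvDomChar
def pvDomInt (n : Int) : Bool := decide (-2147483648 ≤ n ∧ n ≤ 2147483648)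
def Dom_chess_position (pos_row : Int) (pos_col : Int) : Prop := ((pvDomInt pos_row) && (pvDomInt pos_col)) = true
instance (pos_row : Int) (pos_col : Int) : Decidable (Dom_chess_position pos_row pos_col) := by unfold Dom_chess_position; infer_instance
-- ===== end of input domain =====

-- ===== PORT A =====
-- header: B replaces A's 8x8 nested equality scan by a bounds check and a closed-form chr/arith formula (simpler).
def chess_position (pos_row : Int) (pos_col : Int) : Option String :=
  -- nested for-loops with early return, ported as nested findSome? over range(8)
  (PySem.List.pyRange 0 8 1).findSome? (fun r =>
    (PySem.List.pyRange 0 8 1).findSome? (fun c =>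
      let letter := Char.ofNat (97 + c.toNat)
      let number : Int := 8 - r
      if r = pos_row ∧ c = pos_col then
        some (letter.toString ++ PySem.Int.toStr number)
      else none))

-- ===== PORT B =====
def chess_position_alt (pos_row : Int) (pos_col : Int) : Option String :=
  if 0 ≤ pos_row ∧ pos_row < 8 ∧ 0 ≤ pos_col ∧ pos_col < 8 then
    some ((Char.ofNat (97 + pos_col.toNat)).toString ++ PySem.Int.toStr (8 - pos_row))
  else none

-- ===== PRECONDITION & SPEC =====
def Spec_chess_position (pos_row : Int) (pos_col : Int) (out : Option String) : Prop := out = chess_position_alt pos_row pos_col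
instance (pos_row : Int) (pos_col : Int) (out : Option String) : Decidable (Spec_chess_position pos_row pos_col out) := by unfold Spec_chess_position; infer_instance

-- ===== CLAIM (what is proved, stated in full; the proofs are below) =====
def Claim_equal_chess_position : Prop := ∀ (pos_row : Int) (pos_col : Int), Dom_chess_position pos_row pos_col → Spec_chess_position pos_row pos_col (chess_position pos_row pos_col)

-- ===== LEMMAS AND PROOFS =====

-- ===== VERDICT (by name: the statement is the Claim_ definition above) =====
lemma chess_position_none (pos_row pos_col : Int)
    (h : ¬(0 ≤ pos_row ∧ pos_row < 8 ∧ 0 ≤ pos_col ∧ pos_col < 8)) :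
    chess_position pos_row pos_col = none := by
  unfold chess_position
  rw [List.findSome?_eq_none_iff]
  intro r hr
  rw [List.findSome?_eq_none_iff]
  intro c hc
  have e : PySem.List.pyRange 0 8 1 = [0,1,2,3,4,5,6,7] := by decide
  rw [e] at hr hc
  simp only [List.mem_cons, List.not_mem_nil, or_false] at hr hc
  have hr' : 0 ≤ r ∧ r < 8 := by rcases hr with h|h|h|h|h|h|h|h <;> omega
  have hc' : 0 ≤ c ∧ c < 8 := by rcases hc with h|h|h|h|h|h|h|h <;> omega
  exact if_neg (by rintro ⟨rfl, rfl⟩; exact h ⟨hr'.1, hr'.2, hc'.1, hc'.2⟩)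

theorem chess_position_spec : Claim_equal_chess_position := by
  intro pos_row pos_col _
  unfold Spec_chess_position
  by_cases h : 0 ≤ pos_row ∧ pos_row < 8 ∧ 0 ≤ pos_col ∧ pos_col < 8
  · obtain ⟨h1, h2, h3, h4⟩ := h
    interval_cases pos_row <;> interval_cases pos_col <;> rfl
  · rw [chess_position_none _ _ h]
    unfold chess_position_alt
    rw [if_neg h]
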